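-- pv_equiv track=rewrite | github.com/jc30flores/My-Checkio-s-Exercises | ChekiO Exercises/Easy/Home's Island/Shorter_Set.py | remove_min_max
-- ===== SOURCE A (Python) =====
-- def remove_min_max(data: set, total:int) -> set:
--     # your code here
--     for i in range(total):
--         if len(data) == 0:
--             break
--         data.remove(max(data))
--         if len(data) == 0:
--             break
--         data.remove(min(data))
--     return data
-- ===== SOURCE B (Python) =====
-- def remove_min_max(data: set, total: int) -> set:
--     # One-shot: keep only the middle slice of the sorted elements; mutates data in place like A.
--     if total <= 0:
--         return data
--     keep = sorted(data)[total:len(data) - total]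
--     data.intersection_update(keep)
--     return data
-- ===== Notes on version B (the rewrite author's own statement) =====
-- stated objective: faster
-- what changed: Replaces the remove-max/remove-min loop with a single sort and one set intersection against the middle slice sorted(data)[total:len(data)-total].
import Mathlib
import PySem

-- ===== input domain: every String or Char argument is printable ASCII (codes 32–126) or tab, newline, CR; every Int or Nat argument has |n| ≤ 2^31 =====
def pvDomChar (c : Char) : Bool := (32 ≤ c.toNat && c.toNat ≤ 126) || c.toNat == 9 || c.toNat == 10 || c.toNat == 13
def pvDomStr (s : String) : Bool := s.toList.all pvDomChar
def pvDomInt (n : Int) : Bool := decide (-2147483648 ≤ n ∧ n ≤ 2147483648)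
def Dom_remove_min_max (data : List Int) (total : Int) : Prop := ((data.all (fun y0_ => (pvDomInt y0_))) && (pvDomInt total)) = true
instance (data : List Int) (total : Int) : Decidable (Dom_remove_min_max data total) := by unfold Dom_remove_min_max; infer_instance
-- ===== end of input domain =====

-- B replaces A's remove-max/remove-min loop by one sort plus a set intersection with the
-- middle slice (faster); both A and B mutate `data` in place in Python in the same way
-- (the result set is also the mutated argument), and the claim is about the returned set.

-- ===== PORT A =====
-- the `for i in range(total)` loop; each iteration removes max(data) then min(data), breaking when empty
def remove_min_maxLoop : Nat → List Int → List Int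
  | 0, data => data
  | n + 1, data =>
    if PySem.Set.len data = 0 then data
    else
      match PySem.List.max? data (fun x => x) with
      | none => data  -- unreachable: data is nonempty here
      | some M =>
        let d1 := PySem.Set.discard data M
        if PySem.Set.len d1 = 0 then d1
        else
          match PySem.List.min? d1 (fun x => x) with
          | none => d1  -- unreachable: d1 is nonempty here
          | some m => remove_min_maxLoop n (PySem.Set.discard d1 m)

def remove_min_max (data : List Int) (total : Int) : List Int :=
  remove_min_maxLoop total.toNat data

-- ===== PORT B =====
def remove_min_max_alt (data : List Int) (total : Int) : List Int :=
  if total ≤ 0 then data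
  else
    let keep := PySem.List.slice (PySem.List.sorted data (fun x => x))
      (some total) (some ((data.length : Int) - total))
    PySem.Set.inter data keep

-- ===== PRECONDITION & SPEC =====
-- data is a Python set, so its List Int representation holds distinct elements (the type
-- convention's representation invariant); Pre_ states exactly that and excludes nothing else.
def Pre_remove_min_max (data : List Int) (total : Int) : Prop := data.Nodup
instance (data : List Int) (total : Int) : Decidable (Pre_remove_min_max data total) := by
  unfold Pre_remove_min_max; infer_instance
def pvWitness_remove_min_max : List Int × Int := ([3, 1, 2, 5, 4], 1)

def Spec_remove_min_max (data : List Int) (total : Int) (out : List Int) : Prop := out = remove_min_max_alt data total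
instance (data : List Int) (total : Int) (out : List Int) : Decidable (Spec_remove_min_max data total out) := by unfold Spec_remove_min_max; infer_instance

-- ===== CLAIM (what is proved, stated in full; the proofs are below) =====
def Claim_equal_remove_min_max : Prop := ∀ (data : List Int) (total : Int), Dom_remove_min_max data total → Pre_remove_min_max data total → Spec_remove_min_max data total (remove_min_max data total)

-- ===== LEMMAS AND PROOFS =====

-- the middle slice of the sorted elements, as the proofs manipulate it
def midSl (data : List Int) (k : Nat) : List Int :=
  ((PySem.List.sorted data (fun x => x)).drop k).take (data.length - 2 * k)

-- B's Python slice is exactly midSl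
theorem slice_mid (s : List Int) (t : Nat) :
    PySem.List.slice s (some (t : Int)) (some ((s.length : Int) - (t : Int)))
      = (s.drop t).take (s.length - 2 * t) := by
  by_cases h : t ≤ s.length
  · have hb : ((s.length : Int) - (t : Int)) = ((s.length - t : Nat) : Int) := by omega
    rw [hb, PySem.List.slice_natCast]
    congr 1
    omega
  · -- t > length: both sides are empty
    have hdrop : s.drop t = [] := List.drop_eq_nil_of_le (by omega)
    rw [hdrop]
    simp only [List.take_nil]
    apply List.eq_nil_of_length_eq_zero
    rw [PySem.List.length_slice]
    have h1 : PySem.List.clampIdx s.length ((t : Nat) : Int) = min t s.length :=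
      PySem.List.clampIdx_natCast s.length t
    have h2 : PySem.List.clampIdx s.length ((s.length : Int) - (t : Int)) ≤ s.length :=
      PySem.List.clampIdx_le _ _
    omega

theorem sorted_lt_of_nodup (l : List Int) (h : l.Nodup) :
    (PySem.List.sorted l (fun x => x)).Pairwise (· < ·) := by
  have hperm : (PySem.List.sorted l (fun x => x)).Perm l := PySem.List.sorted_perm l _ false
  have hnd : (PySem.List.sorted l (fun x => x)).Nodup := hperm.symm.nodup h
  have hle : (PySem.List.sorted l (fun x => x)).Pairwise (fun a b => a ≤ b) :=
    PySem.List.sorted_pairwise l _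
  exact (hle.and hnd).imp (fun hab => lt_of_le_of_ne hab.1 hab.2)

-- discard on a nodup list is List.erase
theorem discard_eq_erase (l : List Int) (a : Int) (h : l.Nodup) :
    PySem.Set.discard l a = l.erase a := by
  rw [h.erase_eq_filter]
  simp [PySem.Set.discard, bne]

-- inter is unchanged by discarding an element not in the other set
theorem inter_discard (l t : List Int) (a : Int) (ha : a ∉ t) :
    PySem.Set.inter (PySem.Set.discard l a) t = PySem.Set.inter l t := by
  simp only [PySem.Set.inter, PySem.Set.discard, List.filter_filter]
  apply List.filter_congr
  intro x _
  by_cases hx : x ∈ t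
  · have hxa : x ≠ a := fun he => ha (he ▸ hx)
    simp [PySem.Set.contains, hx, hxa]
  · simp [PySem.Set.contains, hx]

-- the last element of a ≤-sorted list bounds every member
theorem le_getLast_of_pairwise (s : List Int) (hs : s.Pairwise (· ≤ ·)) (hne : s ≠ [])
    (x : Int) (hx : x ∈ s) : x ≤ s.getLast hne := by
  have hdecomp : s.dropLast ++ [s.getLast hne] = s := List.dropLast_append_getLast hne
  rw [← hdecomp] at hs hx
  rcases List.mem_append.mp hx with h1 | h2
  · exact (List.pairwise_append.mp hs).2.2 x h1 _ (List.mem_singleton_self _)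
  · rw [List.mem_singleton.mp h2]

-- main invariant: the loop keeps exactly the middle slice
theorem loop_eq_mid (k : Nat) :
    ∀ data : List Int, data.Nodup →
      remove_min_maxLoop k data = PySem.Set.inter data (midSl data k) := by
  induction k with
  | zero =>
    intro data hnd
    have hlen : (PySem.List.sorted data (fun x => x)).length = data.length :=
      PySem.List.length_sorted data _ false
    have hmid : midSl data 0 = PySem.List.sorted data (fun x => x) := by
      unfold midSl
      rw [List.drop_zero, Nat.mul_zero, Nat.sub_zero, ← hlen, List.take_length]
    rw [hmid]
    simp only [remove_min_maxLoop, PySem.Set.inter]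
    symm
    apply List.filter_eq_self.mpr
    intro x hx
    have : x ∈ PySem.List.sorted data (fun x => x) := by
      rw [PySem.List.mem_sorted]; exact hx
    simpa [PySem.Set.contains] using this
  | succ k ih =>
    intro data hnd
    by_cases hemp : data = []
    · subst hemp
      simp [remove_min_maxLoop, PySem.Set.len, PySem.Set.inter]
    · have hguard : ¬ (PySem.Set.len data = 0) := by
        simp [PySem.Set.len, hemp, List.length_eq_zero_iff]
      -- max(data)
      obtain ⟨M, hM⟩ : ∃ M, PySem.List.max? data (fun x => x) = some M := by
        cases hMc : PySem.List.max? data (fun x : Int => x) with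
        | none =>
          rw [PySem.List.max?_eq_none_iff] at hMc
          exact absurd hMc hemp
        | some M => exact ⟨M, rfl⟩
      set s := PySem.List.sorted data (fun x => x) with hs_def
      have hperm : s.Perm data := PySem.List.sorted_perm data _ false
      have hnds : s.Nodup := hperm.symm.nodup hnd
      have hslt : s.Pairwise (· < ·) := sorted_lt_of_nodup data hnd
      have hsle : s.Pairwise (· ≤ ·) := hslt.imp le_of_lt
      have hsne : s ≠ [] := by
        intro h0
        rw [hs_def, PySem.List.sorted_eq_nil_iff] at h0
        exact hemp h0
      have hlen : s.length = data.length := hperm.length_eq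
      -- M is the last element of s
      have hMmem : M ∈ data := PySem.List.max?_mem hM
      have hMmax : ∀ y ∈ data, y ≤ M := by
        intro y hy
        exact PySem.List.max?_isMax hM y hy
      have hMlast : M = s.getLast hsne := by
        have h2 : s.getLast hsne ≤ M := hMmax _ (hperm.mem_iff.mp (s.getLast_mem hsne))
        have h1 : M ≤ s.getLast hsne :=
          le_getLast_of_pairwise s hsle hsne M (hperm.mem_iff.mpr hMmem)
        
        omega
      have hsdecomp : s.dropLast ++ [M] = s := by
        rw [hMlast]; exact List.dropLast_append_getLast hsne
      have hMnotinit : M ∉ s.dropLast := by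
        intro hMin
        have hp : (s.dropLast ++ [M]).Pairwise (· < ·) := by rw [hsdecomp]; exact hslt
        exact absurd ((List.pairwise_append.mp hp).2.2 M hMin M (List.mem_singleton_self M))
          (lt_irrefl M)
      -- d1 = data.erase M, sorted d1 = s.dropLast
      have hd1 : PySem.Set.discard data M = data.erase M := discard_eq_erase data M hnd
      have hd1perm : (data.erase M).Perm s.dropLast := by
        have h1 : (data.erase M).Perm (s.erase M) := (hperm.erase M).symm
        have h2 : s.erase M = s.dropLast := by
          conv_lhs => rw [← hsdecomp]
          rw [List.erase_append_right _ hMnotinit]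
          simp
        rwa [h2] at h1
      have hd1nd : (data.erase M).Nodup := hnd.erase M
      have hinit_lt : s.dropLast.Pairwise (· < ·) := hslt.sublist (List.dropLast_sublist s)
      have hsorted_d1 : PySem.List.sorted (data.erase M) (fun x => x) = s.dropLast :=
        PySem.List.sorted_eq_of_perm_of_pairwise_lt _ _ (fun x => x) hd1perm.symm hinit_lt
      have hd1len : (data.erase M).length = data.length - 1 := by
        rw [hd1perm.length_eq, List.length_dropLast, hlen]
      by_cases hd1emp : data.erase M = []
      · -- data was a singleton [M]; loop returns []
        have hn1 : data.length = 1 := by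
          have := hd1len
          rw [hd1emp] at this
          simp at this
          have hpos : 0 < data.length := List.length_pos_of_ne_nil hemp
          omega
        have hmid0 : midSl data (k + 1) = [] := by
          unfold midSl
          have : data.length - 2 * (k + 1) = 0 := by omega
          rw [this, List.take_zero]
        rw [hmid0]
        simp only [remove_min_maxLoop, hM, hguard, if_false]
        rw [hd1, hd1emp]
        simp [PySem.Set.len, PySem.Set.inter, PySem.Set.contains]
      · -- the generic step
        have hguard1 : ¬ (PySem.Set.len (PySem.Set.discard data M) = 0) := by
          rw [hd1]
          simp [PySem.Set.len, hd1emp, List.length_eq_zero_iff]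
        obtain ⟨m, hm⟩ : ∃ m, PySem.List.min? (PySem.Set.discard data M) (fun x => x) = some m := by
          cases hmc : PySem.List.min? (PySem.Set.discard data M) (fun x : Int => x) with
          | none =>
            rw [hd1, PySem.List.min?_eq_none_iff] at hmc
            exact absurd hmc hd1emp
          | some m => exact ⟨m, rfl⟩
        have hm' : PySem.List.min? (data.erase M) (fun x => x) = some m := by rwa [hd1] at hm
        -- m is the head of s.dropLast
        have hinitne : s.dropLast ≠ [] := by
          intro h0
          rw [h0, PySem.List.sorted_eq_nil_iff] at hsorted_d1
          exact hd1emp hsorted_d1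
        obtain ⟨m0, t, hmt⟩ : ∃ m0 t, s.dropLast = m0 :: t := by
          cases hc : s.dropLast with
          | nil => exact absurd hc hinitne
          | cons a b => exact ⟨a, b, rfl⟩
        have hmm0 : m = m0 := by
          have hhd : PySem.List.sorted (data.erase M) (fun x => x) = m0 :: t := by
            rw [hsorted_d1, hmt]
          have h1 : m0 ≤ m :=
            PySem.List.key_head_sorted_le _ _ hhd m (PySem.List.min?_mem hm')
          have hm0mem : m0 ∈ data.erase M := by
            have : m0 ∈ PySem.List.sorted (data.erase M) (fun x => x) := by
              rw [hhd]; exact List.mem_cons_self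
            rwa [PySem.List.mem_sorted] at this
          have h2 : m ≤ m0 := PySem.List.min?_isMin hm' m0 hm0mem
          omega
        -- d2 = (data.erase M).erase m, sorted d2 = t
        have hd2 : PySem.Set.discard (data.erase M) m = (data.erase M).erase m :=
          discard_eq_erase _ m hd1nd
        have hd2perm : ((data.erase M).erase m).Perm t := by
          rw [hmm0]
          have h1 : ((data.erase M).erase m0).Perm (s.dropLast.erase m0) := hd1perm.erase m0
          rw [hmt, List.erase_cons_head] at h1
          exact h1
        have ht_lt : t.Pairwise (· < ·) := by
          have := hinit_lt
          rw [hmt] at this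
          exact (List.pairwise_cons.mp this).2
        have hd2nd : ((data.erase M).erase m).Nodup := hd1nd.erase m
        have hsorted_d2 : PySem.List.sorted ((data.erase M).erase m) (fun x => x) = t :=
          PySem.List.sorted_eq_of_perm_of_pairwise_lt _ _ (fun x => x) hd2perm.symm ht_lt
        have hd2len : ((data.erase M).erase m).length = data.length - 2 := by
          rw [hd2perm.length_eq]
          have : s.dropLast.length = data.length - 1 := by
            rw [List.length_dropLast, hlen]
          rw [hmt] at this
          simp at this
          omega
        have hn2 : 2 ≤ data.length := by
          have hpos : 0 < (data.erase M).length := List.length_pos_of_ne_nil hd1emp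
          omega
        -- mid of d2 at k equals mid of data at k+1
        have ht_eq : t = (s.drop 1).dropLast := by
          have h1 : s.dropLast = m0 :: t := hmt
          have h2 : (s.drop 1).dropLast = s.dropLast.drop 1 := by
            rw [List.dropLast_eq_take, List.dropLast_eq_take, List.drop_take,
              List.length_drop]
          rw [h2, h1]
          simp
        have hmid_eq : midSl ((data.erase M).erase m) k = midSl data (k + 1) := by
          unfold midSl
          rw [hsorted_d2, hd2len, ht_eq]
          rw [List.dropLast_eq_take, List.length_drop, List.drop_take, List.take_take,
            List.drop_drop, ← hs_def]
          congr 1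
          · omega
          · congr 1
            omega
        -- elements of the mid slice avoid M and m
        have hmid_sub_t : ∀ x ∈ midSl ((data.erase M).erase m) k, x ∈ t := by
          intro x hx
          unfold midSl at hx
          rw [hsorted_d2] at hx
          exact List.mem_of_mem_drop (List.mem_of_mem_take hx)
        have hMnotmid : M ∉ midSl ((data.erase M).erase m) k := by
          intro hx
          have : M ∈ s.dropLast := by
            rw [hmt]
            exact List.mem_cons_of_mem _ (hmid_sub_t M hx)
          exact hMnotinit this
        have hmnotmid : m ∉ midSl ((data.erase M).erase m) k := by
          intro hx
          have hxt : m ∈ t := hmid_sub_t m hx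
          have hnd' : (m0 :: t).Nodup := by
            rw [← hmt]
            exact hnds.sublist (List.dropLast_sublist s)
          exact (List.nodup_cons.mp hnd').1 (hmm0 ▸ hxt)
        -- put it together
        simp only [remove_min_maxLoop, hM, hguard, if_false, hguard1, hm]
        rw [ih (PySem.Set.discard (PySem.Set.discard data M) m) (by rw [hd1, hd2]; exact hd2nd)]
        rw [hd1, hd2]
        set T := midSl ((data.erase M).erase m) k with hT
        have step1 : PySem.Set.inter ((data.erase M).erase m) T
            = PySem.Set.inter (data.erase M) T := by
          rw [← hd2]
          exact inter_discard _ _ m hmnotmid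
        have step2 : PySem.Set.inter (data.erase M) T
            = PySem.Set.inter data T := by
          rw [← hd1]
          exact inter_discard _ _ M hMnotmid
        rw [step1, step2, hmid_eq]

-- ===== VERDICT (by name: the statement is the Claim_ definition above) =====
theorem remove_min_max_spec : Claim_equal_remove_min_max := by
  intro data total _hdom hnd
  unfold Spec_remove_min_max remove_min_max remove_min_max_alt
  by_cases hle : total ≤ 0
  · have : total.toNat = 0 := Int.toNat_of_nonpos hle
    rw [this, if_pos hle]
    rfl
  · rw [if_neg hle]
    have htot : total = ((total.toNat : Nat) : Int) := by omega
    have hlen : (PySem.List.sorted data (fun x => x)).length = data.length :=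
      PySem.List.length_sorted data _ false
    have hsl : PySem.List.slice (PySem.List.sorted data (fun x => x))
        (some total) (some ((data.length : Int) - total)) = midSl data total.toNat := by
      rw [htot, ← hlen]
      rw [slice_mid]
      unfold midSl
      rw [hlen]
      simp only [Int.toNat_natCast]
    rw [hsl]
    exact loop_eq_mid total.toNat data hnd
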